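-- pv_equiv track=rewrite | github.com/GluuFederation/community-edition-setup | setup_app/utils/base.py | get_clean_args
-- ===== SOURCE A (Python) =====
-- def get_clean_args(args):
--     argsc = args[:]
--
--     for a in ('-R', '-h', '-p'):
--         if a in argsc:
--             argsc.remove(a)
--
--     if '-m' in argsc:
--         m = argsc.index('-m')
--         argsc.pop(m)
--
--     return argsc
-- ===== SOURCE B (Python) =====
-- def get_clean_args(args):
--     to_remove = {'-R', '-h', '-p', '-m'}
--     out = []
--     for a in args:
--         if a in to_remove:
--             to_remove.discard(a)
--         else:
--             out.append(a)
--     return out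
-- ===== Notes on version B (the rewrite author's own statement) =====
-- stated objective: simpler
-- what changed: Replaces A's four separate membership-test-and-remove scans over a copied list by a single left-to-right pass that keeps a shrinking removal set, dropping only the first occurrence of each flag; B also does not mutate a copy.
import Mathlib
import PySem

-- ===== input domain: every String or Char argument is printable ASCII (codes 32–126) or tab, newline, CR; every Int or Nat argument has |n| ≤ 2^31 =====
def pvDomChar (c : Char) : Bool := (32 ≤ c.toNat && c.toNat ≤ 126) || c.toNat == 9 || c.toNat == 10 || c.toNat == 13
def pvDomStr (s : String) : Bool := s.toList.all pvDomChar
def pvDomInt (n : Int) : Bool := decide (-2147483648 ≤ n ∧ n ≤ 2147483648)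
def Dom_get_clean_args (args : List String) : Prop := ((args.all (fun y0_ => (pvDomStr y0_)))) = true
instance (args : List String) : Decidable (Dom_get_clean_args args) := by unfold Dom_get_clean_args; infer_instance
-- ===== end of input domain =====

-- B removes each flag in one pass over args with a shrinking removal set instead of A's per-flag scans; return value only (A mutates only its private copy).

-- ===== PORT A =====
def get_clean_args (args : List String) : List String :=
  let argsc := args
  let argsc := (["-R", "-h", "-p"] : List String).foldl
    (fun ac a =>
      if a ∈ ac then
        match PySem.List.remove? ac a with
        | some r => r
        | none => ac
      else ac) argsc
  if "-m" ∈ argsc then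
    match PySem.List.index? argsc "-m" with
    | some m =>
      match PySem.List.pop? argsc (m : Int) with
      | some (_, r) => r
      | none => argsc
    | none => argsc
  else argsc

-- ===== PORT B =====
def pvDropPass (xs : List String) (toRemove : PySem.Set String) : List String :=
  match xs with
  | [] => []
  | x :: rest =>
    if PySem.Set.contains toRemove x then
      pvDropPass rest (PySem.Set.discard toRemove x)
    else
      x :: pvDropPass rest toRemove

def get_clean_args_alt (args : List String) : List String :=
  pvDropPass args (PySem.Set.ofList ["-R", "-h", "-p", "-m"])

-- ===== PRECONDITION & SPEC =====
def Spec_get_clean_args (args : List String) (out : List String) : Prop := out = get_clean_args_alt args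
instance (args : List String) (out : List String) : Decidable (Spec_get_clean_args args out) := by unfold Spec_get_clean_args; infer_instance

-- ===== CLAIM (what is proved, stated in full; the proofs are below) =====
def Claim_equal_get_clean_args : Prop := ∀ (args : List String), Dom_get_clean_args args → Spec_get_clean_args args (get_clean_args args)

-- ===== LEMMAS AND PROOFS =====

-- A's guarded `remove` of one flag is `List.erase`.
theorem stepA_eq_erase (ac : List String) (a : String) :
    (if a ∈ ac then
        (match PySem.List.remove? ac a with
         | some r => r
         | none => ac)
      else ac) = ac.erase a := by
  by_cases h : a ∈ ac
  · simp [h, PySem.List.remove?_eq_some_erase ac a h]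
  · simp [h, List.erase_of_not_mem h]

-- A's index/pop block for '-m' is `List.erase`.
theorem mblock_eq_erase (ac : List String) :
    (if "-m" ∈ ac then
        match PySem.List.index? ac "-m" with
        | some m =>
          match PySem.List.pop? ac (m : Int) with
          | some (_, r) => r
          | none => ac
        | none => ac
      else ac) = ac.erase "-m" := by
  by_cases h : "-m" ∈ ac
  · have hidx0 : List.idxOf? "-m" ac = some (ac.idxOf "-m") := by
      have h1 : List.idxOf? "-m" ac ≠ none := by
        simp [List.idxOf?_eq_none_iff]; exact h
      rcases Option.ne_none_iff_exists'.mp h1 with ⟨k, hk⟩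
      have hg := List.idxOf_eq_getD_idxOf? "-m" ac
      rw [hk] at hg ⊢
      simp [hg]
    have hidx : PySem.List.index? ac "-m" = some (ac.idxOf "-m") := by
      simp [PySem.List.index?_eq_idxOf?, hidx0]
    have hlt : ac.idxOf "-m" < ac.length := List.idxOf_lt_length_of_mem h
    have hpop := PySem.List.pop?_natCast (xs := ac) (n := ac.idxOf "-m") hlt
    have her : ac.erase "-m" = ac.eraseIdx (ac.idxOf "-m") :=
      List.erase_eq_eraseIdx_of_idxOf rfl
    simp only [if_pos h, PySem.List.index?_eq_idxOf?, hidx0, hpop, her]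
  · simp [h, List.erase_of_not_mem h]

-- Folding erase over a set never recreates elements out of the empty list.
theorem foldl_erase_nil (S : List String) : S.foldl List.erase ([] : List String) = [] := by
  induction S with
  | nil => rfl
  | cons a S ih => simpa using ih

theorem filter_ne_of_not_mem (S : List String) (x : String) (h : x ∉ S) :
    S.filter (fun y => !(y == x)) = S := by
  refine List.filter_eq_self.mpr ?_
  intro y hy
  simp only [Bool.not_eq_eq_eq_not, Bool.not_true, beq_eq_false_iff_ne]
  rintro rfl; exact h hy

theorem foldl_erase_cons_of_not_mem (S : List String) (x : String) (xs : List String)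
    (h : x ∉ S) : S.foldl List.erase (x :: xs) = x :: S.foldl List.erase xs := by
  induction S generalizing xs with
  | nil => rfl
  | cons a S ih =>
    have hax : ¬ (x == a) = true := by
      simp only [beq_iff_eq]; rintro rfl; exact h (List.mem_cons_self)
    simp only [List.foldl_cons, List.erase_cons, hax]
    exact ih _ (fun hx => h (List.mem_cons_of_mem _ hx))

theorem foldl_erase_cons_of_mem (S : List String) (x : String) (xs : List String)
    (hnd : S.Nodup) (h : x ∈ S) :
    S.foldl List.erase (x :: xs) = (S.filter (fun y => !(y == x))).foldl List.erase xs := by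
  induction S generalizing xs with
  | nil => cases h
  | cons a S ih =>
    by_cases hax : a = x
    · subst hax
      have hnm : a ∉ S := (List.nodup_cons.mp hnd).1
      simp [List.erase_cons_head, filter_ne_of_not_mem S a hnm]
    · have hxS : x ∈ S := by
        rcases List.mem_cons.mp h with h' | h'
        · exact absurd h'.symm hax
        · exact h'
      have hxa : ¬ (x == a) = true := by simp; exact fun e => hax e.symm
      have hba : (!(a == x)) = true := by simp; exact hax
      simp only [List.foldl_cons, List.erase_cons, hxa, List.filter_cons, hba]
      exact ih _ ((List.nodup_cons.mp hnd).2) hxS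

-- B's single pass with a shrinking set computes the same erase chain.
theorem pvDropPass_eq (xs : List String) : ∀ S : List String, S.Nodup →
    pvDropPass xs S = S.foldl List.erase xs := by
  induction xs with
  | nil => intro S _; simp [pvDropPass, foldl_erase_nil]
  | cons x rest ih =>
    intro S hnd
    by_cases h : x ∈ S
    · have hc : PySem.Set.contains S x = true := (PySem.Set.contains_iff S x).mpr h
      rw [pvDropPass, if_pos hc]
      simp only [PySem.Set.discard]
      rw [ih _ (List.Nodup.filter _ hnd)]
      exact (foldl_erase_cons_of_mem S x rest hnd h).symm
    · have hc : ¬ PySem.Set.contains S x = true := fun hc => h ((PySem.Set.contains_iff S x).mp hc)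
      rw [pvDropPass, if_neg hc, ih _ hnd]
      exact (foldl_erase_cons_of_not_mem S x rest h).symm

-- ===== VERDICT (by name: the statement is the Claim_ definition above) =====
theorem get_clean_args_spec : Claim_equal_get_clean_args := by
  intro args _
  unfold Spec_get_clean_args get_clean_args get_clean_args_alt
  rw [pvDropPass_eq args _ (by decide)]
  simp only [stepA_eq_erase, List.foldl_cons, List.foldl_nil]
  rw [mblock_eq_erase]
  rfl
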